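-- pv_equiv track=rewrite | github.com/HomeLabTec/pokemon | backend/app/scripts/seed_prices.py | pick_tcgcsv_variant
-- ===== SOURCE A (Python) =====
-- from typing import Any, Optional
--
-- def normalize_token(value: str) -> str:
--     return "".join(ch for ch in value.lower().strip() if ch.isalnum())
--
-- def pick_tcgcsv_variant(prices: list) -> Optional[dict]:
--     if not prices:
--         return None
--     preference = [
--         "normal",
--         "holofoil",
--         "reverseholofoil",
--         "reverse",
--         "holo",
--         "1stedition",
--         "1steditionholofoil",
--         "unlimited",
--         "unlimitedholofoil",
--     ]
--     by_key = {}
--     for price in prices: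
--         subtype = normalize_token(str(price.get("subTypeName") or ""))
--         by_key[subtype] = price
--     for key in preference:
--         if key in by_key:
--             return by_key[key]
--     return prices[0] if prices else None
-- ===== SOURCE B (Python) =====
-- from typing import Any, Optional
--
-- PREFERENCE = [
--     "normal",
--     "holofoil",
--     "reverseholofoil",
--     "reverse",
--     "holo",
--     "1stedition",
--     "1steditionholofoil",
--     "unlimited",
--     "unlimitedholofoil",
-- ]
--
-- def normalize_token(value: str) -> str:
--     return "".join(ch for ch in value.lower().strip() if ch.isalnum())
--
-- def pick_tcgcsv_variant(prices: list) -> Optional[dict]: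
--     if not prices:
--         return None
--     best = None  # (rank, price); last price with the minimal preference rank wins
--     for price in prices:
--         subtype = normalize_token(str(price.get("subTypeName") or ""))
--         if subtype in PREFERENCE:
--             r = PREFERENCE.index(subtype)
--             if best is None or r <= best[0]:
--                 best = (r, price)
--     return best[1] if best is not None else prices[0]
-- ===== Notes on version B (the rewrite author's own statement) =====
-- stated objective: alternative
-- what changed: Replaces A's two staged passes (build a subtype->price dict, then scan the preference list) by a single pass over prices keeping the price with the minimal preference rank, last occurrence winning ties, which reproduces the dict's last-insertion semantics.
import Mathlib
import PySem

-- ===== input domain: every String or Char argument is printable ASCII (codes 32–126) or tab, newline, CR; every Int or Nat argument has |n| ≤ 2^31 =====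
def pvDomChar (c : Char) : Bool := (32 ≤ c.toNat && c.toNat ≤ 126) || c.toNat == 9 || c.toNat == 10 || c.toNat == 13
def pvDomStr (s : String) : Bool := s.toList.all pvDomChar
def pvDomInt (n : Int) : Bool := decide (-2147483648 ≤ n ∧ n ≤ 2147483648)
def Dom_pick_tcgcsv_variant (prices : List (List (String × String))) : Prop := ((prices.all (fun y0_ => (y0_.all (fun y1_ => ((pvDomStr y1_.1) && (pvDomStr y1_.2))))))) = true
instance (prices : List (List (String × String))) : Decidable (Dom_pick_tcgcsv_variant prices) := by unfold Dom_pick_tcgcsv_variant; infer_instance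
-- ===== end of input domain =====

-- B replaces A's dict-then-preference-scan by a single pass over prices keeping the minimal-rank (last on ties) match (alternative decomposition, same cost).


-- ===== PORT A =====
-- "".join(ch for ch in value.lower().strip() if ch.isalnum())
def normalize_token (value : String) : String :=
  String.ofList ((PySem.Chars.strip (PySem.Chars.lower value.toList)).filter (fun ch => PySem.Chars.isalnum ch))

-- normalize_token(str(price.get("subTypeName") or "")) ('or ""' only replaces a missing/empty value by "", exact here)
def pvSubKey (price : List (String × String)) : String :=
  normalize_token ((price.lookup "subTypeName").getD "")

def pvPreference : List String :=
  ["normal", "holofoil", "reverseholofoil", "reverse", "holo",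
   "1stedition", "1steditionholofoil", "unlimited", "unlimitedholofoil"]

-- 'for key in preference: if key in by_key: return by_key[key]' then 'return prices[0]'
def pvPrefLoopA (byKey : PySem.Dict String (List (String × String)))
    (prices : List (List (String × String))) : List String → Option (List (String × String))
  | [] => PySem.List.pyGet? prices 0
  | k :: ks =>
    match byKey.get? k with
    | some v => some v
    | none => pvPrefLoopA byKey prices ks

def pick_tcgcsv_variant (prices : List (List (String × String))) : Option (List (String × String)) :=
  if prices = [] then none
  else
    let byKey := prices.foldl (fun d price => d.insert (pvSubKey price) price)
      (PySem.Dict.empty : PySem.Dict String (List (String × String)))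
    pvPrefLoopA byKey prices pvPreference

-- ===== PORT B =====
-- 'if subtype in PREFERENCE: r = PREFERENCE.index(subtype)' — membership test + index = index? match
def pvBestStep (best : Option (Nat × List (String × String))) (price : List (String × String)) :
    Option (Nat × List (String × String)) :=
  match PySem.List.index? pvPreference (pvSubKey price) with
  | none => best
  | some r =>
    match best with
    | none => some (r, price)
    | some (br, _) => if r ≤ br then some (r, price) else best

def pick_tcgcsv_variant_alt (prices : List (List (String × String))) : Option (List (String × String)) :=
  if prices = [] then none
  else
    match prices.foldl pvBestStep none with
    | none => PySem.List.pyGet? prices 0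
    | some (_, v) => some v

-- ===== PRECONDITION & SPEC =====
def Spec_pick_tcgcsv_variant (prices : List (List (String × String))) (out : Option (List (String × String))) : Prop := out = pick_tcgcsv_variant_alt prices
instance (prices : List (List (String × String))) (out : Option (List (String × String))) : Decidable (Spec_pick_tcgcsv_variant prices out) := by unfold Spec_pick_tcgcsv_variant; infer_instance

-- ===== CLAIM (what is proved, stated in full; the proofs are below) =====
def Claim_equal_pick_tcgcsv_variant : Prop := ∀ (prices : List (List (String × String))), Dom_pick_tcgcsv_variant prices → Spec_pick_tcgcsv_variant prices (pick_tcgcsv_variant prices)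

-- ===== LEMMAS AND PROOFS =====

-- Last price in ps whose normalized subtype equals k (what A's dict stores at k).
def pvLastMatch (prices : List (List (String × String))) (k : String) : Option (List (String × String)) :=
  prices.foldl (fun found price => if pvSubKey price == k then some price else found) none

-- First key in the list on which f yields a value.
def pvScan (f : String → Option (List (String × String))) : List String → Option (List (String × String))
  | [] => none
  | k :: ks => match f k with | some v => some v | none => pvScan f ks

theorem pvLastMatch_append (ps : List (List (String × String))) (p : List (String × String)) (k : String) :
    pvLastMatch (ps ++ [p]) k = if pvSubKey p == k then some p else pvLastMatch ps k := by
  simp [pvLastMatch, List.foldl_append]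

theorem pv_get_foldl (prices : List (List (String × String)))
    (d : PySem.Dict String (List (String × String))) (k : String) :
    (prices.foldl (fun d price => d.insert (pvSubKey price) price) d).get? k
      = prices.foldl (fun found price => if pvSubKey price == k then some price else found) (d.get? k) := by
  induction prices generalizing d with
  | nil => rfl
  | cons p ps ih =>
    simp only [List.foldl_cons, ih, PySem.Dict.get?_insert]
    by_cases h : pvSubKey p = k
    · simp [h]
    · simp [h, Ne.symm h]

theorem pvPrefLoopA_eq_scan (byKey : PySem.Dict String (List (String × String)))
    (prices : List (List (String × String))) (ks : List String) :
    pvPrefLoopA byKey prices ks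
      = match pvScan (byKey.get?) ks with
        | none => PySem.List.pyGet? prices 0
        | some v => some v := by
  induction ks with
  | nil => rfl
  | cons k ks ih =>
    simp only [pvPrefLoopA, pvScan, ih]
    cases byKey.get? k <;> simp

theorem pvScan_none (f : String → Option (List (String × String))) (ks : List String)
    (h : ∀ k ∈ ks, f k = none) : pvScan f ks = none := by
  induction ks with
  | nil => rfl
  | cons k ks ih =>
    simp only [pvScan, h k (by simp)]
    exact ih (fun k hk => h k (by simp [hk]))

theorem pvScan_some (f : String → Option (List (String × String))) (v : List (String × String)) :
    ∀ (ks : List String) (r : Nat) (hr : r < ks.length),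
    (∀ j (hj : j < r), f (ks[j]'(by omega)) = none) → f (ks[r]'hr) = some v →
    pvScan f ks = some v := by
  intro ks
  induction ks with
  | nil => intro r hr; simp at hr
  | cons k ks ih =>
    intro r hr hnone hsome
    match r with
    | 0 => simp only [pvScan]; simp only [List.getElem_cons_zero] at hsome; rw [hsome]
    | r + 1 =>
      have h0 := hnone 0 (by omega)
      simp only [List.getElem_cons_zero] at h0
      simp only [pvScan, h0]
      exact ih r (by simpa using hr)
        (fun j hj => by simpa using hnone (j + 1) (by omega))
        (by simpa using hsome)

-- The single-pass fold finds the first preference key with a match, and the last price matching it.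
theorem pvBest_inv (ps : List (List (String × String))) :
    match ps.foldl pvBestStep none with
    | none => ∀ k ∈ pvPreference, pvLastMatch ps k = none
    | some (r, v) => ∃ hr : r < pvPreference.length,
        (∀ j (hj : j < r), pvLastMatch ps (pvPreference[j]'(by omega)) = none)
        ∧ pvLastMatch ps (pvPreference[r]'hr) = some v := by
  induction ps using List.reverseRecOn with
  | nil => intro k _; rfl
  | append_singleton ps p ih =>
    rw [List.foldl_append, List.foldl_cons, List.foldl_nil]
    rcases hidx : PySem.List.index? pvPreference (pvSubKey p) with _ | r
    · -- pvSubKey p ∉ pvPreference: nothing changes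
      have hnot : pvSubKey p ∉ pvPreference := (PySem.List.index?_eq_none_iff _ _).mp hidx
      simp only [pvBestStep, hidx]
      rcases hold : ps.foldl pvBestStep none with _ | ⟨r, v⟩
      · rw [hold] at ih
        intro k hk
        rw [pvLastMatch_append]
        have : pvSubKey p ≠ k := fun h => hnot (h ▸ hk)
        simp [this, ih k hk]
      · rw [hold] at ih
        obtain ⟨hr, hpre, hat⟩ := ih
        refine ⟨hr, fun j hj => ?_, ?_⟩
        · rw [pvLastMatch_append]
          have hmem : pvPreference[j]'(by omega) ∈ pvPreference := List.getElem_mem _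
          have : pvSubKey p ≠ pvPreference[j]'(by omega) := fun h => hnot (h ▸ hmem)
          simp [this, hpre j hj]
        · rw [pvLastMatch_append]
          have hmem : pvPreference[r]'hr ∈ pvPreference := List.getElem_mem _
          have : pvSubKey p ≠ pvPreference[r]'hr := fun h => hnot (h ▸ hmem)
          simp [this, hat]
    · -- pvSubKey p has rank r
      obtain ⟨hr, hat, hbefore⟩ := PySem.List.getElem_of_index?_eq_some hidx
      simp only [pvBestStep, hidx]
      rcases hold : ps.foldl pvBestStep none with _ | ⟨br, w⟩
      · rw [hold] at ih
        refine ⟨hr, fun j hj => ?_, ?_⟩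
        · rw [pvLastMatch_append]
          have hne : pvSubKey p ≠ pvPreference[j]'(by omega) := fun h => hbefore j hj h.symm
          simp [hne, ih _ (List.getElem_mem _)]
        · rw [pvLastMatch_append, hat]
          simp
      · rw [hold] at ih
        obtain ⟨hbr, hpre, hatbr⟩ := ih
        by_cases hle : r ≤ br
        · simp only [if_pos hle]
          refine ⟨hr, fun j hj => ?_, ?_⟩
          · rw [pvLastMatch_append]
            have hne : pvSubKey p ≠ pvPreference[j]'(by omega) := fun h => hbefore j hj h.symm
            simp [hne, hpre j (by omega)]
          · rw [pvLastMatch_append, hat]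
            simp
        · simp only [if_neg hle]
          refine ⟨hbr, fun j hj => ?_, ?_⟩
          · rw [pvLastMatch_append]
            have hne : pvSubKey p ≠ pvPreference[j]'(by omega) := fun h => hbefore j (by omega) h.symm
            simp [hne, hpre j hj]
          · rw [pvLastMatch_append]
            have hne : pvSubKey p ≠ pvPreference[br]'hbr := fun h => hbefore br (by omega) h.symm
            simp [hne, hatbr]

-- ===== VERDICT (by name: the statement is the Claim_ definition above) =====
theorem pick_tcgcsv_variant_spec : Claim_equal_pick_tcgcsv_variant := by
  intro prices _
  unfold Spec_pick_tcgcsv_variant pick_tcgcsv_variant pick_tcgcsv_variant_alt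
  split
  · rfl
  · rw [pvPrefLoopA_eq_scan]
    have hlm : ∀ k, (prices.foldl (fun d price => d.insert (pvSubKey price) price)
        (PySem.Dict.empty : PySem.Dict String (List (String × String)))).get? k = pvLastMatch prices k := by
      intro k
      rw [pv_get_foldl]
      simp [PySem.Dict.get?_empty, pvLastMatch]
    have hscan : pvScan ((prices.foldl (fun d price => d.insert (pvSubKey price) price)
        (PySem.Dict.empty : PySem.Dict String (List (String × String)))).get?) pvPreference
        = pvScan (pvLastMatch prices) pvPreference := by
      have : ∀ ks, pvScan ((prices.foldl (fun d price => d.insert (pvSubKey price) price)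
          (PySem.Dict.empty : PySem.Dict String (List (String × String)))).get?) ks
          = pvScan (pvLastMatch prices) ks := by
        intro ks
        induction ks with
        | nil => rfl
        | cons k ks ih => simp only [pvScan, hlm, ih]
      exact this _
    rw [hscan]
    have hinv := pvBest_inv prices
    rcases hfold : prices.foldl pvBestStep none with _ | ⟨r, v⟩
    · rw [hfold] at hinv
      rw [pvScan_none _ _ hinv]
    · rw [hfold] at hinv
      obtain ⟨hr, hpre, hat⟩ := hinv
      rw [pvScan_some _ v pvPreference r hr hpre hat]
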